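-- pv_equiv track=rewrite | github.com/larikaweb/mod.2 | module_2_hard.py | generate_unique_password
-- ===== SOURCE A (Python) =====
-- def generate_unique_password(n):
--     result = ""  # Переменная для хранения результата
--
--     # Используем множество для отслеживания уникальных пар
--     unique_pairs = set()
--
--     # Перебираем числа для поиска пар
--     for i in range(1, n):
--         for j in range(i, n):  # Начинаем от i, чтобы избежать дублирования пары
--             # Проверяем, делится ли n на сумму пары и условие, чтобы числа следовали друг за другом
--             if i != j and n % (i + j) == 0:
--                 pair = (i, j)
--                 # Проверка уникальности пары
--                 if pair not in unique_pairs: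
--                     # Добавляем пару к результату и запоминаем её как использованную
--                     result += str(i) + str(j)
--                     unique_pairs.add(pair)
--
--     return result
-- ===== SOURCE B (Python) =====
-- def generate_unique_password(n):
--     # Precompute the divisors of n once (only sums s with 3 <= s <= n can divide n),
--     # then for each i pick j = d - i from that short list instead of scanning all j.
--     divisors = [d for d in range(3, n + 1) if n % d == 0]
--     result = ""
--     for i in range(1, n):
--         for d in divisors:
--             j = d - i
--             if i < j < n:
--                 result += str(i) + str(j)
--     return result
-- ===== Notes on version B (the rewrite author's own statement) =====
-- stated objective: faster
-- what changed: B precomputes the list of divisors of n once and, for each i, derives j = d - i from that short divisor list, replacing A's inner scan over all j and its redundant uniqueness set.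
import Mathlib
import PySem

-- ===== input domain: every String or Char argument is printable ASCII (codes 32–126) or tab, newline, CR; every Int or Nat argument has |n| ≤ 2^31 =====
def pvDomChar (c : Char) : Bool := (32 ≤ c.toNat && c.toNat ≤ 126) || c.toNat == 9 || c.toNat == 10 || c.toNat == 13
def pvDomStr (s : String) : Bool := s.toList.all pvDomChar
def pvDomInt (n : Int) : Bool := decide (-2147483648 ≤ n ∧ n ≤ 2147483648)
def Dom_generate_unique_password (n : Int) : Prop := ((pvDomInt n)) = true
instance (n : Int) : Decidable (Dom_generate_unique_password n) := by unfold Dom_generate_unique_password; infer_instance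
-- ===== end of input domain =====

-- B precomputes the divisors of n once and derives j = d - i from that list (faster; same return value).


-- ===== PORT A =====
def generate_unique_password (n : Int) : String :=
  ((PySem.List.pyRange 1 n 1).foldl (fun st i =>
      (PySem.List.pyRange i n 1).foldl (fun st j =>
        if i ≠ j ∧ PySem.Int.mod n (i + j) = 0 then
          if PySem.Set.contains st.2 (i, j) then st
          else (st.1 ++ PySem.Int.toStr i ++ PySem.Int.toStr j, PySem.Set.add st.2 (i, j))
        else st) st)
    ("", (PySem.Set.empty : PySem.Set (Int × Int)))).1

-- ===== PORT B =====
def generate_unique_password_alt (n : Int) : String :=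
  let divisors := (PySem.List.pyRange 3 (n + 1) 1).filter (fun d => PySem.Int.mod n d == 0)
  (PySem.List.pyRange 1 n 1).foldl (fun result i =>
    divisors.foldl (fun result d =>
      if i < d - i ∧ d - i < n then result ++ PySem.Int.toStr i ++ PySem.Int.toStr (d - i)
      else result) result) ""

-- ===== PRECONDITION & SPEC =====
def Spec_generate_unique_password (n : Int) (out : String) : Prop := out = generate_unique_password_alt n
instance (n : Int) (out : String) : Decidable (Spec_generate_unique_password n out) := by unfold Spec_generate_unique_password; infer_instance

-- ===== CLAIM (what is proved, stated in full; the proofs are below) =====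
def Claim_equal_generate_unique_password : Prop := ∀ (n : Int), Dom_generate_unique_password n → Spec_generate_unique_password n (generate_unique_password n)

-- ===== LEMMAS AND PROOFS =====

-- A's inner loop: the uniqueness set never fires (all pairs (i, j) are fresh), so the loop
-- appends the pieces for the qualifying j's and records exactly those pairs.
lemma innerA (n i : Int) (L : List Int) : L.Nodup →
    ∀ (s : String) (S : PySem.Set (Int × Int)), (∀ j ∈ L, (i, j) ∉ S) →
    L.foldl (fun st j =>
        if i ≠ j ∧ PySem.Int.mod n (i + j) = 0 then
          if PySem.Set.contains st.2 (i, j) then st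
          else (st.1 ++ PySem.Int.toStr i ++ PySem.Int.toStr j, PySem.Set.add st.2 (i, j))
        else st) (s, S)
    = ((L.filter (fun j => decide (i ≠ j ∧ PySem.Int.mod n (i + j) = 0))).foldl
         (fun acc j => acc ++ PySem.Int.toStr i ++ PySem.Int.toStr j) s,
       S ++ (L.filter (fun j => decide (i ≠ j ∧ PySem.Int.mod n (i + j) = 0))).map (fun j => (i, j))) := by
  induction L with
  | nil => intro _ s S h; simp
  | cons j L ih =>
    intro hnd s S h
    have hjS : (i, j) ∉ S := h j (by simp)
    have hnd' : L.Nodup := hnd.of_cons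
    have hjL : j ∉ L := (List.nodup_cons.mp hnd).1
    have hcontains : PySem.Set.contains S (i, j) = false := by
      simp only [PySem.Set.contains_eq_listContains]
      simpa using hjS
    have hadd : PySem.Set.add S (i, j) = S ++ [(i, j)] := by
      simp [PySem.Set.add]
      exact hjS
    by_cases hc : i ≠ j ∧ PySem.Int.mod n (i + j) = 0
    · simp only [List.foldl_cons]
      rw [if_pos hc, hcontains]
      simp only [Bool.false_eq_true, if_false, hadd]
      rw [ih hnd' _ _ (by
        intro j' hj' hmem
        rcases List.mem_append.mp hmem with hm | hm
        · exact h j' (by simp [hj']) hm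
        · simp only [List.mem_singleton, Prod.mk.injEq] at hm
          exact hjL (hm.2 ▸ hj'))]
      simp [hc, List.append_assoc]
    · simp only [List.foldl_cons]
      rw [if_neg hc]
      rw [ih hnd' _ _ (fun j' hj' => h j' (by simp [hj']))]
      simp [hc]

-- A's outer loop, with the invariant that the set only holds pairs whose first component
-- is an i already processed (never one still to come).
lemma outerA (n : Int) (I : List Int) : I.Nodup →
    ∀ (s : String) (S : PySem.Set (Int × Int)), (∀ p ∈ S, p.1 ∉ I) →
    (I.foldl (fun st i =>
        (PySem.List.pyRange i n 1).foldl (fun st j =>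
          if i ≠ j ∧ PySem.Int.mod n (i + j) = 0 then
            if PySem.Set.contains st.2 (i, j) then st
            else (st.1 ++ PySem.Int.toStr i ++ PySem.Int.toStr j, PySem.Set.add st.2 (i, j))
          else st) st) (s, S)).1
    = I.foldl (fun acc i =>
        ((PySem.List.pyRange i n 1).filter (fun j => decide (i ≠ j ∧ PySem.Int.mod n (i + j) = 0))).foldl
          (fun acc j => acc ++ PySem.Int.toStr i ++ PySem.Int.toStr j) acc) s := by
  induction I with
  | nil => intro _ s S h; simp
  | cons i I ih =>
    intro hnd s S h
    simp only [List.foldl_cons]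
    rw [innerA n i _ (PySem.List.nodup_pyRange_one _ _) _ _ (by
      intro j hj hmem
      exact h (i, j) hmem (by simp))]
    exact ih hnd.of_cons _ _ (by
      intro p hp
      rcases List.mem_append.mp hp with hm | hm
      · intro hcm; exact h p hm (by simp [hcm])
      · rcases List.mem_map.mp hm with ⟨j, _, rfl⟩
        simpa using (List.nodup_cons.mp hnd).1)

-- The j's A accepts for a given i, shifted by i, are exactly the divisors B accepts for that i.
lemma key_lists (n i : Int) (hi1 : 1 ≤ i) (hin : i < n) :
    ((PySem.List.pyRange 3 (n + 1) 1).filter (fun d => PySem.Int.mod n d == 0)).filter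
        (fun d => decide (i < d - i ∧ d - i < n))
      = ((PySem.List.pyRange i n 1).filter
          (fun j => decide (i ≠ j ∧ PySem.Int.mod n (i + j) = 0))).map (fun j => i + j) := by
  have hn2 : 2 ≤ n := by omega
  -- both sides are strictly increasing with the same members
  have hsortL : (((PySem.List.pyRange 3 (n + 1) 1).filter (fun d => PySem.Int.mod n d == 0)).filter
      (fun d => decide (i < d - i ∧ d - i < n))).Pairwise (· < ·) :=
    ((PySem.List.pairwise_lt_pyRange_one 3 (n + 1)).filter _).filter _
  have hsortR : ((((PySem.List.pyRange i n 1).filter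
      (fun j => decide (i ≠ j ∧ PySem.Int.mod n (i + j) = 0))).map (fun j => i + j)).Pairwise (· < ·)) := by
    rw [List.pairwise_map]
    exact ((PySem.List.pairwise_lt_pyRange_one i n).filter _).imp (by omega)
  have hmem : ∀ x, (x ∈ ((PySem.List.pyRange 3 (n + 1) 1).filter (fun d => PySem.Int.mod n d == 0)).filter
        (fun d => decide (i < d - i ∧ d - i < n)))
      ↔ (x ∈ ((PySem.List.pyRange i n 1).filter
          (fun j => decide (i ≠ j ∧ PySem.Int.mod n (i + j) = 0))).map (fun j => i + j)) := by
    intro x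
    simp only [List.mem_filter, List.mem_map, PySem.List.mem_pyRange_one, beq_iff_eq,
      decide_eq_true_eq]
    constructor
    · rintro ⟨⟨⟨hx3, hxn⟩, hdvd⟩, hlt, hlt2⟩
      exact ⟨x - i, ⟨⟨by omega, by omega⟩, by omega, by
        have : i + (x - i) = x := by ring
        rw [this]; exact hdvd⟩, by ring⟩
    · rintro ⟨j, ⟨⟨hij, hjn⟩, hne, hdvd⟩, rfl⟩
      have hxpos : 0 < i + j := by omega
      have hji : i < j := by omega
      have hle : i + j ≤ n := by
        by_contra hgt
        push Not at hgt
        have := PySem.Int.mod_eq_emod_of_pos (a := n) (b := i + j) (by omega)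
        rw [this, Int.emod_eq_of_lt (by omega) hgt] at hdvd
        omega
      exact ⟨⟨⟨by omega, by omega⟩, hdvd⟩, by omega, by omega⟩
  have hperm := (List.perm_ext_iff_of_nodup
      ((PySem.List.nodup_pyRange_one 3 (n + 1)).filter _ |>.filter _)
      (((PySem.List.nodup_pyRange_one i n).filter _).map (add_right_injective i))).mpr hmem
  exact PySem.List.eq_of_perm_of_pairwise_le_of_injective (fun x => x) (fun a b h => h)
    hperm (hsortL.imp le_of_lt) (hsortR.imp le_of_lt)

-- ===== VERDICT =====
theorem generate_unique_password_spec : Claim_equal_generate_unique_password := by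
  intro n _
  unfold Spec_generate_unique_password generate_unique_password generate_unique_password_alt
  rw [outerA n _ (PySem.List.nodup_pyRange_one _ _) _ _ (by intro p hp; simp [PySem.Set.empty] at hp)]
  simp only []
  apply PySem.List.foldl_congr_mem
  intro acc i hi
  have hi' := (PySem.List.mem_pyRange_one).mp hi
  rw [PySem.List.foldl_ite_eq_foldl_filter]
  rw [key_lists n i hi'.1 hi'.2]
  rw [List.foldl_map]
  simp
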